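-- pv_equiv track=rewrite | github.com/mayosuke/atcoder | test_ABC203C.py | sol1
-- ===== SOURCE A (Python) =====
-- def sol1(N,K,F):
--     f = {}
--     for i,k in F:
--         if not i in f:
--             f[i] = 0
--         f[i] += k
--
--     l = 0
--     while K > 0:
--         if l in f:
--             K += f[l]
--         K -= 1
--         l += 1
--     return l
-- ===== SOURCE B (Python) =====
-- def sol1(N, K, F):
--     f = {}
--     for i, k in F:
--         if not i in f:
--             f[i] = 0
--         f[i] += k
--     if K <= 0:
--         return 0
--     cur, fuel = 0, K
--     for p, v in sorted(f.items()):
--         if p < 0: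
--             continue
--         d = p - cur
--         if fuel <= d:
--             return cur + fuel
--         fuel += v - d
--         cur = p
--         if fuel <= 0:
--             return cur + 1
--     return cur + fuel
-- ===== Notes on version B (the rewrite author's own statement) =====
-- stated objective: faster
-- what changed: A walks one unit per loop iteration (O(K + total fuel) steps); B sorts the friend positions once and jumps between consecutive nonnegative friend positions, accumulating fuel and computing the stop point arithmetically.
import Mathlib
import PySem

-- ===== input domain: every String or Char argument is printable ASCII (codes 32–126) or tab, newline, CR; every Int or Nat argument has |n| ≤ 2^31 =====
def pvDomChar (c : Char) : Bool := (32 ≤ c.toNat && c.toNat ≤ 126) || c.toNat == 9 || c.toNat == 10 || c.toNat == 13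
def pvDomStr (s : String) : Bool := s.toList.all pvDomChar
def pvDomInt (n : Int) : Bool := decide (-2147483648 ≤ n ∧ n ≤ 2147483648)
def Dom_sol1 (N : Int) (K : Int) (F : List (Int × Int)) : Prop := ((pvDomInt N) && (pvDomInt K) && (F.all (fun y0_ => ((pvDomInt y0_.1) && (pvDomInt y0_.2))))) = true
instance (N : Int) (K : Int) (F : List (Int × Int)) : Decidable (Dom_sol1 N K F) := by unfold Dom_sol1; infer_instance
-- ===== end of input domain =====

-- B replaces A's unit-step O(K + fuel) walk by sorting the friend positions once and jumping arithmetically between consecutive friends (measured faster on large inputs).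


-- ===== PORT A =====
-- the dict build (first loop of both Pythons, identical in A and B):
-- f = {}; for i,k in F: if not i in f: f[i] = 0; f[i] += k
def pvBuild (F : List (Int × Int)) : PySem.Dict Int Int :=
  F.foldl (fun f ik =>
      let f' := if f.contains ik.1 then f else f.insert ik.1 0
      f'.modify ik.1 0 (· + ik.2))
    PySem.Dict.empty

-- fuel bound for A's while loop: the sum of the positive stored fuels at positions ≥ l
def pvPosSumL (its : List (Int × Int)) (l : Int) : Int :=
  (its.map (fun pv => if l ≤ pv.1 then max pv.2 0 else 0)).sum

-- A's while loop:  while K > 0: (if l in f: K += f[l]); K -= 1; l += 1; return l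
-- (structural recursion on a fuel bound — K plus the positive stored fuels — which
-- provably dominates the number of iterations; the fuel guard only totalizes the loop)
def pvLoopAGo (f : PySem.Dict Int Int) : Nat → Int → Int → Int
  | 0, _, l => l
  | n + 1, K, l =>
    if K ≤ 0 then l
    else pvLoopAGo f n ((if f.contains l then K + f.getD l 0 else K) - 1) (l + 1)

def sol1 (N : Int) (K : Int) (F : List (Int × Int)) : Int :=
  let f := pvBuild F
  pvLoopAGo f (K + pvPosSumL f.items 0).toNat K 0

-- ===== PORT B =====
-- B's loop:  for p, v in sorted(f.items()): if p < 0: continue; d = p - cur;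
--            if fuel <= d: return cur + fuel; fuel += v - d; cur = p;
--            if fuel <= 0: return cur + 1
--            after the loop: return cur + fuel
def pvLoopB : List (Int × Int) → Int → Int → Int
  | [], cur, fuel => cur + fuel
  | (p, v) :: rest, cur, fuel =>
    if p < 0 then pvLoopB rest cur fuel
    else
      let d := p - cur
      if fuel ≤ d then cur + fuel
      else
        let fuel' := fuel + v - d
        if fuel' ≤ 0 then p + 1
        else pvLoopB rest p fuel'

-- sorted(f.items()): the dict's keys are distinct, so Python's lexicographic tuple sort
-- coincides with sorting by the key (first) component.
def sol1_alt (N : Int) (K : Int) (F : List (Int × Int)) : Int :=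
  let f := pvBuild F
  if K ≤ 0 then 0
  else pvLoopB (PySem.List.sorted f.items (fun pv => pv.1) false) 0 K

-- ===== PRECONDITION & SPEC =====
def Spec_sol1 (N : Int) (K : Int) (F : List (Int × Int)) (out : Int) : Prop := out = sol1_alt N K F
instance (N : Int) (K : Int) (F : List (Int × Int)) (out : Int) : Decidable (Spec_sol1 N K F out) := by unfold Spec_sol1; infer_instance

-- ===== CLAIM (what is proved, stated in full; the proofs are below) =====
def Claim_equal_sol1 : Prop := ∀ (N : Int) (K : Int) (F : List (Int × Int)), Dom_sol1 N K F → Spec_sol1 N K F (sol1 N K F)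

-- ===== LEMMAS AND PROOFS =====

theorem pvPosSumL_nonneg (its : List (Int × Int)) (l : Int) : 0 ≤ pvPosSumL its l := by
  induction its with
  | nil => simp [pvPosSumL]
  | cons hd tl ih =>
    simp only [pvPosSumL, List.map_cons, List.sum_cons] at *
    split_ifs <;> omega

theorem pvPosSumL_succ_le (its : List (Int × Int)) (l : Int) :
    pvPosSumL its (l + 1) ≤ pvPosSumL its l := by
  induction its with
  | nil => simp [pvPosSumL]
  | cons hd tl ih =>
    simp only [pvPosSumL, List.map_cons, List.sum_cons] at *
    split_ifs <;> omega

theorem pvPosSumL_step (its : List (Int × Int)) (l : Int)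
    (h : (PySem.Dict.mk its).contains l = true) :
    pvPosSumL its (l + 1) + (PySem.Dict.mk its).getD l 0 ≤ pvPosSumL its l := by
  induction its with
  | nil => simp [PySem.Dict.contains] at h
  | cons hd tl ih =>
    obtain ⟨a, b⟩ := hd
    have hget : (PySem.Dict.mk ((a, b) :: tl)).getD l 0 =
        if a == l then b else (PySem.Dict.mk tl).getD l 0 := by
      simp only [PySem.Dict.getD_eq_get?_getD, PySem.Dict.get?_mk_cons]
      split_ifs <;> rfl
    by_cases he : a = l
    · have h2 := pvPosSumL_succ_le tl l
      simp only [pvPosSumL, List.map_cons, List.sum_cons] at *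
      rw [hget]
      simp only [he, beq_self_eq_true, if_true]
      split_ifs <;> omega
    · have hc : (PySem.Dict.mk tl).contains l = true := by
        simpa [PySem.Dict.contains, he] using h
      have := ih hc
      simp only [pvPosSumL, List.map_cons, List.sum_cons] at *
      rw [hget]
      simp only [he, beq_iff_eq, if_false]
      split_ifs <;> omega

-- the fuel bound decreases across one loop iteration
theorem pvMeasure_dec (f : PySem.Dict Int Int) (K l : Int) (h : ¬ K ≤ 0) :
    ((if f.contains l then K + f.getD l 0 else K) - 1 + pvPosSumL f.items (l + 1)).toNat <
      (K + pvPosSumL f.items l).toNat := by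
  have h1 := pvPosSumL_nonneg f.items l
  have h2 := pvPosSumL_succ_le f.items l
  split_ifs with hc
  · have h3 := pvPosSumL_step f.items l hc
    simp only [show PySem.Dict.mk f.items = f from rfl] at h3
    omega
  · omega

-- any fuel at least the bound computes the same value
theorem pvLoopAGo_stable (f : PySem.Dict Int Int) : ∀ (n m : Nat) (K l : Int),
    (K + pvPosSumL f.items l).toNat ≤ n → (K + pvPosSumL f.items l).toNat ≤ m →
    pvLoopAGo f n K l = pvLoopAGo f m K l := by
  intro n
  induction n with
  | zero =>
    intro m K l hn _
    have h1 := pvPosSumL_nonneg f.items l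
    have hK : K ≤ 0 := by omega
    cases m with
    | zero => rfl
    | succ m => simp [pvLoopAGo, hK]
  | succ n ih =>
    intro m K l hn hm
    cases m with
    | zero =>
      have h1 := pvPosSumL_nonneg f.items l
      have hK : K ≤ 0 := by omega
      simp [pvLoopAGo, hK]
    | succ m =>
      by_cases hK : K ≤ 0
      · simp [pvLoopAGo, hK]
      · simp only [pvLoopAGo, if_neg hK]
        have hd := pvMeasure_dec f K l hK
        exact ih m _ _ (by omega) (by omega)

-- A's loop, run with its canonical fuel bound
def pvRun (f : PySem.Dict Int Int) (K l : Int) : Int :=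
  pvLoopAGo f (K + pvPosSumL f.items l).toNat K l

theorem pvRun_base (f : PySem.Dict Int Int) (K l : Int) (h : K ≤ 0) :
    pvRun f K l = l := by
  unfold pvRun
  cases hn : (K + pvPosSumL f.items l).toNat with
  | zero => rfl
  | succ n => simp [pvLoopAGo, h]

theorem pvRun_step (f : PySem.Dict Int Int) (K l : Int) (h : ¬ K ≤ 0) :
    pvRun f K l = pvRun f ((if f.contains l then K + f.getD l 0 else K) - 1) (l + 1) := by
  have hd := pvMeasure_dec f K l h
  have h1 := pvPosSumL_nonneg f.items l
  obtain ⟨n, hn⟩ : ∃ n, (K + pvPosSumL f.items l).toNat = n + 1 := ⟨(K + pvPosSumL f.items l).toNat - 1, by omega⟩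
  unfold pvRun
  rw [hn]
  simp only [pvLoopAGo, if_neg h]
  exact pvLoopAGo_stable f n _ _ _ (by omega) le_rfl


-- pvLoopA returns l immediately when K ≤ 0

-- running pvLoopA across a friend-free stretch of n positions
theorem pvRun_run (f : PySem.Dict Int Int) (n : Nat) : ∀ (l K : Int), 0 < K →
    (∀ q, l ≤ q → q < l + (n : Int) → f.contains q = false) →
    pvRun f K l = if K ≤ (n : Int) then l + K else pvRun f (K - (n : Int)) (l + (n : Int)) := by
  induction n with
  | zero =>
    intro l K hK _
    rw [if_neg (by push_cast; omega)]
    norm_num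
  | succ n ih =>
    intro l K hK hq
    have hcl : f.contains l = false := hq l le_rfl (by push_cast; omega)
    rw [pvRun_step f K l (by omega), hcl]
    simp only [Bool.false_eq_true, if_false]
    by_cases hK1 : K ≤ 1
    · have hK1' : K = 1 := by omega
      rw [hK1']
      rw [pvRun_base f _ _ (by omega), if_pos (by omega)]
    · rw [ih (l + 1) (K - 1) (by omega)
        (fun q h1 h2 => hq q (by omega) (by push_cast at h2 ⊢; omega))]
      by_cases hle : K ≤ (n : Int) + 1
      · rw [if_pos (by omega), if_pos (by omega)]
        omega
      · rw [if_neg (by push_cast; omega), if_neg (by push_cast; omega)]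
        congr 1 <;> push_cast <;> omega

-- one refuel step of pvLoopA at a friend position
theorem pvRun_refuel (f : PySem.Dict Int Int) (K p : Int) (hK : 0 < K)
    (hc : f.contains p = true) :
    pvRun f K p = pvRun f (K + f.getD p 0 - 1) (p + 1) := by
  rw [pvRun_step f K p (by omega), hc, if_pos rfl]

-- the `if p < 0: continue` branch of B's loop only ever skips, so the loop equals
-- the same loop over the nonnegative-key pairs
theorem pvLoopB_filter (ps : List (Int × Int)) : ∀ (cur fuel : Int),
    pvLoopB ps cur fuel = pvLoopB (ps.filter (fun pv => decide (0 ≤ pv.1))) cur fuel := by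
  induction ps with
  | nil => intro _ _; rfl
  | cons hd tl ih =>
    intro cur fuel
    obtain ⟨p, v⟩ := hd
    by_cases hp : p < 0
    · rw [List.filter_cons, if_neg (by simpa using (by omega : ¬ 0 ≤ p))]
      simp only [pvLoopB, if_pos hp]
      exact ih cur fuel
    · rw [List.filter_cons, if_pos (by simpa using (by omega : 0 ≤ p))]
      simp only [pvLoopB, if_neg hp]
      split_ifs
      · rfl
      · rfl
      · exact ih p _

-- MAIN INVARIANT: with A one step past cur holding fuel-1, and ps the sorted
-- remaining friend pairs strictly beyond cur, the two loops agree.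
theorem pvMain (f : PySem.Dict Int Int) (ps : List (Int × Int)) : ∀ (cur fuel : Int),
    0 < fuel → 0 ≤ cur →
    (∀ pv ∈ ps, cur < pv.1 ∧ f.get? pv.1 = some pv.2) →
    ((ps.map Prod.fst).Pairwise (· < ·)) →
    (∀ q, f.contains q = true → cur < q → q ∈ ps.map Prod.fst) →
    pvRun f (fuel - 1) (cur + 1) = pvLoopB ps cur fuel := by
  induction ps with
  | nil =>
    intro cur fuel h0 hcur _ _ h3
    have hnc : ∀ q, cur < q → f.contains q = false := by
      intro q hq
      cases hc : f.contains q with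
      | false => rfl
      | true => exact absurd (h3 q hc hq) (by simp)
    show pvRun f (fuel - 1) (cur + 1) = cur + fuel
    by_cases h1 : fuel - 1 ≤ 0
    · rw [pvRun_base f _ _ h1]; omega
    · rw [pvRun_run f (fuel - 1).toNat (cur + 1) (fuel - 1) (by omega)
        (fun q hq1 _ => hnc q (by omega)), if_pos (by omega)]
      omega
  | cons hd tl ih =>
    intro cur fuel h0 hcur h1 h2 h3
    obtain ⟨p, v⟩ := hd
    have hp := h1 (p, v) List.mem_cons_self
    have hp0 : ¬ p < 0 := by omega
    have hnc : ∀ q, cur < q → q < p → f.contains q = false := by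
      intro q hq1 hq2
      cases hc : f.contains q with
      | false => rfl
      | true =>
        have := h3 q hc hq1
        simp only [List.map_cons, List.mem_cons] at this
        rcases this with h | h
        · omega
        · have := (List.pairwise_cons.mp h2).1 _ h
          omega
    simp only [pvLoopB, if_neg hp0]
    by_cases hfd : fuel ≤ p - cur
    · rw [if_pos hfd]
      by_cases h1' : fuel - 1 ≤ 0
      · rw [pvRun_base f _ _ h1']; omega
      · rw [pvRun_run f (p - (cur + 1)).toNat (cur + 1) (fuel - 1) (by omega)
          (fun q hq1 hq2 => hnc q (by omega) (by omega)), if_pos (by omega)]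
        omega
    · rw [if_neg hfd]
      have hcp : f.contains p = true := by
        rw [PySem.Dict.contains_eq_isSome_get?, hp.2]; rfl
      have hgd : f.getD p 0 = v := PySem.Dict.getD_of_get?_eq_some f 0 hp.2
      have hstep : pvRun f (fuel - 1) (cur + 1) = pvRun f (fuel - (p - cur) + v - 1) (p + 1) := by
        rcases eq_or_lt_of_le (by omega : cur + 1 ≤ p) with he | hlt
        · rw [← he, pvRun_refuel f _ _ (by omega) (he ▸ hcp)]
          rw [he, hgd]
          congr 1
          omega
        · rw [pvRun_run f (p - (cur + 1)).toNat (cur + 1) (fuel - 1) (by omega)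
            (fun q hq1 hq2 => hnc q (by omega) (by omega)), if_neg (by omega)]
          have hl : cur + 1 + ((p - (cur + 1)).toNat : Int) = p := by omega
          rw [hl]
          rw [pvRun_refuel f _ _ (by omega) hcp, hgd]
          congr 1
          omega
      rw [hstep]
      by_cases hf' : fuel + v - (p - cur) ≤ 0
      · rw [if_pos hf', pvRun_base f _ _ (by omega)]
      · rw [if_neg hf']
        have htl := ih p (fuel + v - (p - cur)) (by omega) (by omega)
          (fun pv hpv => ⟨(List.pairwise_cons.mp h2).1 _ (List.mem_map_of_mem hpv),
            (h1 pv (List.mem_cons_of_mem _ hpv)).2⟩)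
          ((List.pairwise_cons.mp h2).2)
          (fun q hq hqp => by
            have := h3 q hq (by omega)
            simp only [List.map_cons, List.mem_cons] at this
            rcases this with h | h
            · omega
            · exact h)
        rw [← htl]
        congr 1
        omega

-- the dict build keeps its keys distinct
theorem pvBuild_aux_nodup (F : List (Int × Int)) : ∀ (d : PySem.Dict Int Int),
    d.keys.Nodup →
    (F.foldl (fun f ik =>
        let f' := if f.contains ik.1 then f else f.insert ik.1 0
        f'.modify ik.1 0 (· + ik.2)) d).keys.Nodup := by
  induction F with
  | nil => intro d hd; exact hd
  | cons hd tl ih =>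
    intro d hnd
    rw [List.foldl_cons]
    apply ih
    by_cases hc : d.contains hd.1 = true
    · rw [if_pos hc]
      exact PySem.Dict.nodup_keys_insert d hd.1 _ hnd
    · rw [if_neg hc]
      exact PySem.Dict.nodup_keys_insert _ hd.1 _ (PySem.Dict.nodup_keys_insert d hd.1 0 hnd)

theorem pvBuild_nodup (F : List (Int × Int)) : (pvBuild F).keys.Nodup :=
  pvBuild_aux_nodup F PySem.Dict.empty (by simp [PySem.Dict.empty, PySem.Dict.keys])

theorem sol1_eq_alt (N K : Int) (F : List (Int × Int)) : sol1 N K F = sol1_alt N K F := by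
  have hsol : sol1 N K F = pvRun (pvBuild F) K 0 := rfl
  rw [hsol]
  unfold sol1_alt
  set f := pvBuild F with hf
  by_cases hK : K ≤ 0
  · rw [if_pos hK, pvRun_base f _ _ hK]
  · rw [if_neg hK]
    have hnd : f.keys.Nodup := pvBuild_nodup F
    set ps := PySem.List.sorted f.items (fun pv => pv.1) false with hps
    have hperm : ps.Perm f.items := PySem.List.sorted_perm f.items _ false
    have hmapperm : (ps.map (fun pv => pv.1)).Perm f.keys := hperm.map _
    have hndps : (ps.map (fun pv => pv.1)).Nodup := hmapperm.nodup_iff.mpr hnd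
    have hple : ((ps.map (fun pv => pv.1)).Pairwise (· ≤ ·)) :=
      PySem.List.sorted_map_key_pairwise f.items _
    have hplt : ((ps.map (fun pv => pv.1)).Pairwise (· < ·)) :=
      (hple.and hndps).imp (fun h => lt_of_le_of_ne h.1 h.2)
    set psf := ps.filter (fun pv => decide (0 ≤ pv.1)) with hpsf
    have hsub : (psf.map (fun pv => pv.1)).Sublist (ps.map (fun pv => pv.1)) :=
      List.Sublist.map _ List.filter_sublist
    have hpltf : ((psf.map (fun pv => pv.1)).Pairwise (· < ·)) := hplt.sublist hsub
    have hmemf : ∀ pv : Int × Int, pv ∈ psf ↔ pv ∈ f.items ∧ 0 ≤ pv.1 := by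
      intro pv
      rw [hpsf, List.mem_filter, hperm.mem_iff]
      simp
    have hget : ∀ pv : Int × Int, pv ∈ psf → f.get? pv.1 = some pv.2 := by
      intro pv hpv
      exact (PySem.Dict.get?_eq_some_iff_mem_items f pv.1 pv.2 hnd).mpr ((hmemf pv).mp hpv).1
    have hkeymem : ∀ q, f.contains q = true → 0 ≤ q → q ∈ psf.map (fun pv => pv.1) := by
      intro q hq hq0
      obtain ⟨w, hw⟩ := Option.isSome_iff_exists.mp
        (PySem.Dict.contains_eq_isSome_get? f q ▸ hq)
      have : (q, w) ∈ psf := (hmemf (q, w)).mpr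
        ⟨PySem.Dict.mem_items_of_get?_eq_some f hw, hq0⟩
      exact List.mem_map_of_mem this
    rw [pvLoopB_filter, ← hpsf]
    rw [pvRun_step f K 0 hK]
    by_cases hc0 : f.contains 0 = true
    · -- position 0 itself holds a friend: it is the head of psf
      rw [hc0]
      simp only [if_true]
      obtain ⟨v0, hv0⟩ := Option.isSome_iff_exists.mp
        (PySem.Dict.contains_eq_isSome_get? f 0 ▸ hc0)
      have hv0m : (0, v0) ∈ psf := (hmemf (0, v0)).mpr
        ⟨PySem.Dict.mem_items_of_get?_eq_some f hv0, le_rfl⟩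
      have hgd0 : f.getD 0 0 = v0 := PySem.Dict.getD_of_get?_eq_some f 0 hv0
      obtain ⟨hd, tl, hdecomp⟩ : ∃ hd tl, psf = hd :: tl := by
        cases h : psf with
        | nil => rw [h] at hv0m; exact absurd hv0m (by simp)
        | cons a b => exact ⟨a, b, rfl⟩
      have hhd : hd = (0, v0) := by
        rw [hdecomp] at hv0m
        rcases List.mem_cons.mp hv0m with h | h
        · exact h.symm
        · exfalso
          have hlt : hd.1 < 0 := by
            have := (List.pairwise_cons.mp (hdecomp ▸ hpltf)).1 0
              (by simpa using List.mem_map_of_mem (f := fun pv => pv.1) h)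
            simpa using this
          have : 0 ≤ hd.1 := ((hmemf hd).mp (hdecomp ▸ List.mem_cons_self)).2
          omega
      have hpltf' : ((((0, v0) :: tl).map (fun pv : Int × Int => pv.1)).Pairwise (· < ·)) := by
        rw [← hhd, ← hdecomp]; exact hpltf
      rw [hdecomp, hhd]
      simp only [pvLoopB, if_neg (by omega : ¬ (0:Int) < 0), if_neg (by omega : ¬ K ≤ 0 - 0)]
      rw [hgd0]
      by_cases hf' : K + v0 - (0 - 0) ≤ 0
      · rw [if_pos hf', pvRun_base f _ _ (by omega)]
      · rw [if_neg hf']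
        have := pvMain f tl 0 (K + v0 - (0 - 0)) (by omega) le_rfl
          (fun pv hpv => ⟨by
              have := (List.pairwise_cons.mp hpltf').1 pv.1
                (List.mem_map_of_mem hpv)
              simpa using this,
            hget pv (by rw [hdecomp, hhd]; exact List.mem_cons_of_mem _ hpv)⟩)
          ((List.pairwise_cons.mp hpltf').2)
          (fun q hq hq0 => by
            have := hkeymem q hq (by omega)
            rw [hdecomp, hhd] at this
            simp only [List.map_cons, List.mem_cons] at this
            rcases this with h | h
            · omega
            · exact h)
        rw [← this]
        congr 1
        omega
    · -- no friend at position 0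
      rw [eq_false_of_ne_true hc0]
      simp only [Bool.false_eq_true, if_false]
      exact pvMain f psf 0 K (by omega) le_rfl
        (fun pv hpv => ⟨by
            have h0le : 0 ≤ pv.1 := ((hmemf pv).mp hpv).2
            have hne : pv.1 ≠ 0 := by
              intro he
              apply hc0
              rw [PySem.Dict.contains_eq_isSome_get?, ← he, hget pv hpv]
              rfl
            omega,
          hget pv hpv⟩)
        hpltf
        (fun q hq hq0 => hkeymem q hq (by omega))

theorem sol1_spec : Claim_equal_sol1 := by
  intro N K F _
  unfold Spec_sol1
  exact sol1_eq_alt N K F
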